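-- pv_equiv track=rewrite | github.com/mariaferlinda/Compi | popo.py | corchete
-- ===== SOURCE A (Python) =====
-- def corchete (rresultado:list) -> list :
--     final = list()
--     dicc = dict()
--     numerito = 1
--     for j in rresultado:
--         if j not in dicc:
--             dicc[j] = f'[{numerito}, {j}]'
--             numerito += 1
--             final.append(dicc[j])
--         else:
--             final.append(dicc[j])
--     return final
-- ===== SOURCE B (Python) =====
-- def corchete(rresultado: list) -> list:
--     # per-element closed form: the label number of j is the count of distinct
--     # values in the prefix of rresultado ending at j's first occurrence;
--     # no dict, no table, no incremental state.
--     return [f'[{len(set(rresultado[:rresultado.index(j) + 1]))}, {j}]'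
--             for j in rresultado]
-- ===== Notes on version B (the rewrite author's own statement) =====
-- stated objective: alternative
-- what changed: A makes one incremental pass carrying a dict of preformatted labels and a running counter; B keeps no state at all and computes each label independently by a closed form: the number of j is the count of distinct elements in the prefix ending at j's first occurrence (len(set(xs[:xs.index(j)+1]))), formatted on the fly.
import Mathlib
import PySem

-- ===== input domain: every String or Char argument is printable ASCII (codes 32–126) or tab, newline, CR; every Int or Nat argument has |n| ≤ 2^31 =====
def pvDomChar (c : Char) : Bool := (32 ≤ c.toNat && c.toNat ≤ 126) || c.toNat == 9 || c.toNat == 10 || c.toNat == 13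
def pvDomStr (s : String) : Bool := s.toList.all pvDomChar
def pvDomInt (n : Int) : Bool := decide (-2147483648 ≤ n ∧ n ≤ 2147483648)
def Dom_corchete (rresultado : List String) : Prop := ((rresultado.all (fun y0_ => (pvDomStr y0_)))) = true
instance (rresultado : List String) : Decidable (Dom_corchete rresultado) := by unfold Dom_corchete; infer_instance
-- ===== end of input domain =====

-- B replaces A's single incremental pass (dict of preformatted labels + running counter) by a
-- stateless per-element closed form: the number of j is the distinct count of the prefix ending
-- at j's first occurrence (objective: alternative; B is quadratic, not faster).

-- f'[{i}, {j}]'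
def fmtEntry (i : Int) (j : String) : String :=
  "[" ++ PySem.Int.toStr i ++ ", " ++ j ++ "]"

-- ===== PORT A =====
-- loop body of A: state (final, dicc, numerito)
def corcheteStep (st : List String × PySem.Dict String String × Int) (j : String) :
    List String × PySem.Dict String String × Int :=
  match st with
  | (final, dicc, numerito) =>
    if dicc.contains j = false then
      -- dicc[j] = f'[...]'; numerito += 1; final.append(dicc[j])  (key j is present after the insert,
      -- so the `.getD ""` default is never used)
      let dicc' := dicc.insert j (fmtEntry numerito j)
      (final ++ [(dicc'.get? j).getD ""], dicc', numerito + 1)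
    else
      (final ++ [(dicc.get? j).getD ""], dicc, numerito)

def corchete (rresultado : List String) : List String :=
  (rresultado.foldl corcheteStep ([], PySem.Dict.empty, 1)).1

-- ===== PORT B =====
-- [f'[{len(set(rresultado[:rresultado.index(j) + 1]))}, {j}]' for j in rresultado]
-- (j is drawn from rresultado, so rresultado.index(j) never raises and the `.getD 0` default is never used)
def corchete_alt (rresultado : List String) : List String :=
  rresultado.map (fun j =>
    "[" ++ PySem.Int.toStr
      (((PySem.Set.ofList (PySem.List.slice rresultado none
          (some ((((PySem.List.index? rresultado j).getD 0 : Nat) : Int) + 1)))).length : Int))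
      ++ ", " ++ j ++ "]")

-- ===== PRECONDITION & SPEC =====
def Spec_corchete (rresultado : List String) (out : List String) : Prop := out = corchete_alt rresultado
instance (rresultado : List String) (out : List String) : Decidable (Spec_corchete rresultado out) := by unfold Spec_corchete; infer_instance

-- ===== CLAIM (what is proved, stated in full; the proofs are below) =====
def Claim_equal_corchete : Prop := ∀ (rresultado : List String), Dom_corchete rresultado → Spec_corchete rresultado (corchete rresultado)

-- ===== LEMMAS AND PROOFS =====

-- the numbering table built by A's loop from a list of distinct labels, numbered from i0
def buildD (u : List String) (i0 : Nat) : PySem.Dict String String :=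
  PySem.Dict.mk ((u.zipIdx i0).map (fun p => (p.1, fmtEntry (p.2 : Int) p.1)))

lemma get?_mk_append_left {ν : Type} (l1 l2 : List (String × ν)) (j : String) (v : ν)
    (h : (PySem.Dict.mk l1).get? j = some v) :
    (PySem.Dict.mk (l1 ++ l2)).get? j = some v := by
  induction l1 with
  | nil => simp [PySem.Dict.get?] at h
  | cons p l ih =>
    rcases p with ⟨k, w⟩
    rw [PySem.Dict.get?_mk_cons] at h
    rw [List.cons_append, PySem.Dict.get?_mk_cons]
    by_cases hk : (k == j) = true
    · simpa [hk] using h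
    · simp only [Bool.not_eq_true] at hk
      rw [hk] at h ⊢
      simpa using ih h

lemma buildD_cons (x : String) (u : List String) (i0 : Nat) :
    buildD (x :: u) i0 =
      PySem.Dict.mk ((x, fmtEntry (i0 : Int) x) ::
        ((u.zipIdx (i0 + 1)).map (fun p => (p.1, fmtEntry (p.2 : Int) p.1)))) := by
  simp [buildD, List.zipIdx_cons]

lemma get?_buildD_of_not_mem (j : String) : ∀ (u : List String) (i0 : Nat), j ∉ u →
    (buildD u i0).get? j = none := by
  intro u
  induction u with
  | nil => intro i0 _; simp [buildD, PySem.Dict.get?]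
  | cons x u ih =>
    intro i0 h
    rw [buildD_cons, PySem.Dict.get?_mk_cons]
    have hx : x ≠ j := fun he => h (he ▸ List.mem_cons_self)
    simp only [beq_iff_eq, if_neg hx]
    exact ih (i0 + 1) (fun hm => h (List.mem_cons_of_mem _ hm))

lemma get?_buildD_isSome_of_mem (j : String) : ∀ (u : List String) (i0 : Nat), j ∈ u →
    ∃ v, (buildD u i0).get? j = some v := by
  intro u
  induction u with
  | nil => intro i0 h; simp at h
  | cons x u ih =>
    intro i0 h
    rw [buildD_cons, PySem.Dict.get?_mk_cons]
    by_cases hx : x = j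
    · exact ⟨fmtEntry (i0 : Int) j, by subst hx; simp⟩
    · simp only [beq_iff_eq, if_neg hx]
      exact ih (i0 + 1) ((List.mem_cons.mp h).resolve_left (fun he => hx he.symm))

-- an entry already present keeps its looked-up value when the label list is extended on the right
lemma get?_buildD_append (j : String) (u t : List String) (i0 : Nat) (h : j ∈ u) :
    (buildD (u ++ t) i0).get? j = (buildD u i0).get? j := by
  obtain ⟨v, hv⟩ := get?_buildD_isSome_of_mem j u i0 h
  rw [hv]
  have : buildD (u ++ t) i0 =
      PySem.Dict.mk (((u.zipIdx i0).map (fun p => (p.1, fmtEntry (p.2 : Int) p.1))) ++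
        ((t.zipIdx (i0 + u.length)).map (fun p => (p.1, fmtEntry (p.2 : Int) p.1)))) := by
    simp [buildD, List.zipIdx_append]
  rw [this]
  exact get?_mk_append_left _ _ _ _ hv

lemma contains_buildD_false (j : String) (u : List String) (i0 : Nat) (h : j ∉ u) :
    (buildD u i0).contains j = false := by
  rw [PySem.Dict.contains_eq_isSome_get?, get?_buildD_of_not_mem j u i0 h]
  rfl

lemma contains_buildD_true (j : String) (u : List String) (i0 : Nat) (h : j ∈ u) :
    (buildD u i0).contains j = true := by
  obtain ⟨v, hv⟩ := get?_buildD_isSome_of_mem j u i0 h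
  rw [PySem.Dict.contains_eq_isSome_get?, hv]
  rfl

-- inserting a fresh label appends it to the table with the next number
lemma insert_buildD_fresh (j : String) (u : List String) (h : j ∉ u) :
    (buildD u 1).insert j (fmtEntry ((u.length : Int) + 1) j) = buildD (u ++ [j]) 1 := by
  apply PySem.Dict.ext
  rw [PySem.Dict.items_insert_of_not_contains _ _ (contains_buildD_false j u 1 h)]
  have hz : (u ++ [j]).zipIdx 1 = u.zipIdx 1 ++ [(j, 1 + u.length)] := by
    rw [List.zipIdx_append]; rfl
  have hc : ((1 + u.length : Nat) : Int) = (u.length : Int) + 1 := by push_cast; ring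
  simp [buildD, hz, hc]

-- the loop of A, started with the table of an already-seen distinct prefix u, appends the final
-- table's lookups and ends with the table of u extended by the new labels of xs
lemma loopA (xs : List String) : ∀ (u final : List String), u.Nodup →
    List.foldl corcheteStep (final, buildD u 1, (u.length : Int) + 1) xs =
      (final ++ xs.map (fun j => ((buildD (PySem.Set.update u xs) 1).get? j).getD ""),
       buildD (PySem.Set.update u xs) 1, ((PySem.Set.update u xs).length : Int) + 1) := by
  induction xs with
  | nil => intro u final _; simp [PySem.Set.update_nil]
  | cons j xs ih =>
    intro u final hnd
    rw [List.foldl_cons]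
    by_cases hm : j ∈ u
    · have hstep : corcheteStep (final, buildD u 1, (u.length : Int) + 1) j =
          (final ++ [((buildD u 1).get? j).getD ""], buildD u 1, (u.length : Int) + 1) := by
        simp [corcheteStep, contains_buildD_true j u 1 hm]
      rw [hstep, ih u _ hnd, PySem.Set.update_cons, PySem.Set.add_of_mem hm]
      obtain ⟨t, ht⟩ : ∃ t, PySem.Set.update u xs = u ++ t :=
        ⟨_, PySem.Set.update_eq_append_filter u xs⟩
      rw [ht]
      simp only [List.map_cons]
      rw [get?_buildD_append j u t 1 hm]
      simp [List.append_assoc]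
    · have hstep : corcheteStep (final, buildD u 1, (u.length : Int) + 1) j =
          (final ++ [fmtEntry ((u.length : Int) + 1) j], buildD (u ++ [j]) 1,
            ((u.length : Int) + 1) + 1) := by
        simp only [corcheteStep, contains_buildD_false j u 1 hm]
        rw [insert_buildD_fresh j u hm]
        have hv' : (buildD (u ++ [j]) 1).get? j =
            some (fmtEntry ((u.length : Int) + 1) j) := by
          rw [← insert_buildD_fresh j u hm, PySem.Dict.get?_insert_self]
        simp [hv']
      have hlen : ((u.length : Int) + 1) + 1 = (((u ++ [j]).length : Nat) : Int) + 1 := by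
        simp
      have hnd' : (u ++ [j]).Nodup := by
        rw [List.nodup_append]
        refine ⟨hnd, List.nodup_singleton _, ?_⟩
        intro a ha b hb
        simp only [List.mem_singleton] at hb
        subst hb
        exact fun he => hm (he ▸ ha)
      rw [hstep, hlen, ih (u ++ [j]) _ hnd', PySem.Set.update_cons, PySem.Set.add_of_not_mem hm]
      obtain ⟨t, ht⟩ : ∃ t, PySem.Set.update (u ++ [j]) xs = (u ++ [j]) ++ t :=
        ⟨_, PySem.Set.update_eq_append_filter (u ++ [j]) xs⟩
      have hj : ((buildD (PySem.Set.update (u ++ [j]) xs) 1).get? j).getD "" =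
          fmtEntry ((u.length : Int) + 1) j := by
        rw [ht, get?_buildD_append j (u ++ [j]) t 1 (by simp),
          ← insert_buildD_fresh j u hm, PySem.Dict.get?_insert_self]
        rfl
      simp only [List.map_cons, hj]
      simp [List.append_assoc]

-- first-occurrence view of the deduplicated list: if j ∉ pre then
-- ofList (pre ++ j :: suf) starts with ofList pre ++ [j]
lemma ofList_first_occ (pre suf : List String) (j : String) (h : j ∉ pre) :
    ∃ t, PySem.Set.ofList (pre ++ j :: suf) = (PySem.Set.ofList pre ++ [j]) ++ t := by
  have hns : j ∉ PySem.Set.ofList pre := fun hm => h ((PySem.Set.mem_ofList pre j).mp hm)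
  have h1 : PySem.Set.ofList (pre ++ j :: suf) =
      PySem.Set.update (PySem.Set.ofList pre ++ [j]) suf := by
    rw [PySem.Set.ofList_append, PySem.Set.update_cons, PySem.Set.add_of_not_mem hns]
  exact ⟨_, h1.trans (PySem.Set.update_eq_append_filter _ suf)⟩

-- ===== VERDICT (by name: the statement is the Claim_ definition above) =====
theorem corchete_spec : Claim_equal_corchete := by
  intro rresultado _
  unfold Spec_corchete corchete
  have hinit : (([] : List String), (PySem.Dict.empty : PySem.Dict String String), (1 : Int)) =
      (([] : List String), buildD [] 1, ((List.length ([] : List String) : Nat) : Int) + 1) := by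
    simp [buildD, PySem.Dict.empty]
  rw [hinit, loopA rresultado [] [] List.nodup_nil]
  have hupd : PySem.Set.update [] rresultado = PySem.Set.ofList rresultado := by
    simp [pysem]
  simp only [hupd, List.nil_append]
  unfold corchete_alt
  apply List.map_congr_left
  intro j hj
  -- decompose rresultado at j's first occurrence
  have hsome : (PySem.List.index? rresultado j).isSome := by
    rw [PySem.List.index?_isSome_iff]; exact hj
  obtain ⟨k, hk⟩ := Option.isSome_iff_exists.mp hsome
  obtain ⟨pre, suf, hxs, hlen, hnp⟩ := (PySem.List.index?_eq_some_iff rresultado j k).mp hk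
  subst hxs
  have hnsp : j ∉ PySem.Set.ofList pre := fun hm => hnp ((PySem.Set.mem_ofList pre j).mp hm)
  -- A's element: first-match lookup in the full table reaches the entry appended for j
  obtain ⟨t, ht⟩ := ofList_first_occ pre suf j hnp
  rw [ht, get?_buildD_append j _ t 1 (by simp),
    ← insert_buildD_fresh j (PySem.Set.ofList pre) hnsp, PySem.Dict.get?_insert_self]
  -- B's element: the sliced prefix is pre ++ [j]
  rw [hk]
  have hb : ((((some k).getD 0 : Nat) : Int) + 1) = ((k + 1 : Nat) : Int) := by push_cast; simp
  rw [hb, PySem.List.slice_to_natCast]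
  have htake : (pre ++ j :: suf).take (k + 1) = pre ++ [j] := by
    subst hlen
    simp [List.take_append]
  rw [htake]
  have hofl : PySem.Set.ofList (pre ++ [j]) = PySem.Set.ofList pre ++ [j] := by
    rw [PySem.Set.ofList_append_singleton, PySem.Set.add_of_not_mem hnsp]
  rw [hofl]
  simp only [fmtEntry, Option.getD_some, List.length_append, List.length_cons,
    List.length_nil]
  have hc : (((PySem.Set.ofList pre).length + (0 + 1) : Nat) : Int) =
      ((PySem.Set.ofList pre).length : Int) + 1 := by push_cast; ring
  rw [hc]
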